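/-
  THE SEGMENTS OF `GifFreeExtensions` (gifalloc.c:267-282; 107DA0H … 107E32H, 42 instructions; NO protected frame): the assertion at
  its loop head, the two segment claims, and the COMPOSITION (segments ⇒ `GifFreeExtensions.spec`), proved here by induction on the
  number of blocks left.

  WHY IT IS CUT (42 instructions would fit one unit): the loop contains a contract call (`free`), the heap changes in every round,
  and the contract's postcondition names the final heap EXACTLY (`H.releaseAll …`): the loop invariant is the design's business.

  THE CODE:
      107DA0H  four pushes (r13 r12 rbp rbx), `sub rsp, 8`                      rsp = RA − 40
      107DAAH  `r12 = &count`, `rbp = &blocks`, `rbx = *blocks` (checked); NULL → 107E27H (the epilogue: the empty list)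
      107DC3H  the body: `free(rbx->Bytes)` (checked load), `rbx += 24`
      107DD9H  HEAD   `r13 = *blocks`, `rax = r13 + 24 · *count` (both checked); `rbx < rax` → 107DC3H
      107DFFH  `free(r13)`, the checked stores `*blocks = NULL`, `*count = 0`
      107E27H  `add rsp, 8`, four pops, `ret`

  SEGMENTS:
      GifFreeExtensions.1   107DA0H … 107DC3H, 107E27H … ret       19 instructions   —      → `Head 0` | `Returned` (the empty list)
      GifFreeExtensions.2   107DC3H … ret (entered at 107DD9H)     29 instructions   free   `Head k` → `Head (k + 1)` | `Returned`

  THE ORDER OF THE `free`s. The contract's final heap is `H.releaseAll` of the list's objects IN THE ORDER OF `Exts.objs` (the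
  array first); the code frees the blocks' bytes first and the array last. `free`s commute (`release_comm`, `releaseAll_release`):
  `heapAt_end`.

  THE FOOTPRINT. The contract's post says of every window written besides the two cells: a gap of the entry's heap, at or above the
  heap's base or a stack window BELOW the entry stack pointer (so that a caller can conclude that it misses the CURSOR, a stack
  object of gif_decode). `GapWin` is that clause; the loop head carries it (`Head.gaps`).
-/
import Gif.Spec.Alloc
import Gif.LabelsAt
namespace Gif.Spec
open X86 X86.User Asan ProgX.Base ProgX.Base.Spec

namespace GifFreeExtensions

/-! ### The order of `free`s does not matter (wished for Gif/Spec/CommonMore.lean, next to `Heap.releaseAll`) -/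

/-- Freeing at `p` and freeing at `q`, of one object, in either order. -/
theorem releaseObj_comm (p q : Nat) (o : HObj) :
    Heap.releaseObj q (Heap.releaseObj p o) = Heap.releaseObj p (Heap.releaseObj q o) := by
  by_cases hp : o.base = p
  · by_cases hq : o.base = q
    · have e1 : (Heap.releaseObj p o).base = q := by
        rw [releaseObj_base]
        exact hq
      have e2 : (Heap.releaseObj q o).base = p := by
        rw [releaseObj_base]
        exact hp
      rw [releaseObj_of_eq e1, releaseObj_of_eq e2]
      rw [releaseObj_base, releaseObj_base, releaseObj_size, releaseObj_size, releaseObj_cap, releaseObj_cap]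
    · have e1 : (Heap.releaseObj p o).base ≠ q := by
        rw [releaseObj_base]
        exact hq
      rw [releaseObj_of_ne e1, releaseObj_of_ne hq]
  · rw [releaseObj_of_ne hp]
    by_cases hq : o.base = q
    · have e2 : (Heap.releaseObj q o).base ≠ p := by
        rw [releaseObj_base]
        exact hp
      rw [releaseObj_of_ne e2]
    · rw [releaseObj_of_ne hq, releaseObj_of_ne hp]

/-- **Two `free`s commute.** -/
theorem release_comm (H : Heap) (p q : Nat) : (H.release p).release q = (H.release q).release p := by
  have e : (H.objs.map (Heap.releaseObj p)).map (Heap.releaseObj q) =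
      (H.objs.map (Heap.releaseObj q)).map (Heap.releaseObj p) := by
    rw [List.map_map, List.map_map]
    apply List.map_congr_left
    intro o _
    exact releaseObj_comm p q o
  unfold Heap.release
  simp only
  rw [e]

/-- A `free` after a list of `free`s is the same as before it. -/
theorem releaseAll_release (H : Heap) (ps : List Nat) (p : Nat) :
    (H.releaseAll ps).release p = (H.release p).releaseAll ps := by
  induction ps generalizing H with
  | nil => rfl
  | cons a ps ih =>
    rw [Heap.releaseAll_cons, Heap.releaseAll_cons, ih (H.release a), release_comm H a p]

/-- Two lists of `free`s, one after the other. -/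
theorem releaseAll_append (H : Heap) (ps qs : List Nat) : H.releaseAll (ps ++ qs) = (H.releaseAll ps).releaseAll qs := by
  unfold Heap.releaseAll
  exact List.foldl_append

/-- **The order of a list of `free`s does not matter.** -/
theorem releaseAll_perm {ps qs : List Nat} (h : ps.Perm qs) : ∀ H : Heap, H.releaseAll ps = H.releaseAll qs := by
  induction h with
  | nil =>
    intro H
    rfl
  | cons a _ ih =>
    intro H
    rw [Heap.releaseAll_cons, Heap.releaseAll_cons]
    exact ih (H.release a)
  | swap a b l =>
    intro H
    rw [Heap.releaseAll_cons, Heap.releaseAll_cons, Heap.releaseAll_cons, Heap.releaseAll_cons, release_comm H b a]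
  | trans _ _ ih1 ih2 =>
    intro H
    exact (ih1 H).trans (ih2 H)

/-- Where the objects are does not change under a list of `free`s. -/
theorem placed_releaseAll {H : Heap} {objs : List (Nat × Nat)} (h : Placed H objs) (ps : List Nat) :
    Placed (H.releaseAll ps) objs := by
  induction ps generalizing H with
  | nil => exact h
  | cons a ps ih =>
    rw [Heap.releaseAll_cons]
    exact ih (h.release a)

/-- **A `free` changes no object's place**: a window that meets no object of the heap before meets none after, and conversely. -/
theorem gap0_release (H : Heap) (p : Nat) (w : Span) : Gap0 (H.release p) w ↔ Gap0 H w := by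
  constructor
  · intro h x hx
    have hin : Heap.releaseObj p x ∈ (H.release p).objs := by
      rw [Heap.release_objs]
      exact List.mem_map.mpr ⟨x, hx, rfl⟩
    have := h _ hin
    rw [releaseObj_base, releaseObj_cap] at this
    exact this
  · intro h y hy
    rw [Heap.release_objs] at hy
    obtain ⟨x, hx, e⟩ := List.mem_map.mp hy
    rw [← e, releaseObj_base, releaseObj_cap]
    exact h x hx

/-- The same for a list of `free`s. -/
theorem gap0_releaseAll (H : Heap) (ps : List Nat) (w : Span) : Gap0 (H.releaseAll ps) w ↔ Gap0 H w := by
  induction ps generalizing H with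
  | nil => exact Iff.rfl
  | cons a ps ih =>
    rw [Heap.releaseAll_cons]
    exact (ih (H.release a)).trans (gap0_release H a w)

/-! ### The heap and the live objects after `k` rounds -/

/-- **The heap at the loop head after `k` rounds**: the entry's with the bytes of the first `k` blocks freed (a block whose
`Bytes` is NULL has no object: `free(NULL)` changes nothing). -/
def heapAt (H : Heap) (x : Exts) (k : Nat) : Heap :=
  H.releaseAll (((x.blocks.take k).flatMap Blk.objs).map Prod.fst)

/-- **What is still live after `k` rounds**: the holder of the two cells, the array, the bytes of the blocks from `k` on. -/
def liveAt (ob on : Nat) (x : Exts) (k : Nat) : List (Nat × Nat) :=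
  (ob, on) :: (x.arr, 24 * x.cap) :: (x.blocks.drop k).flatMap Blk.objs

/-- Before the first round: the entry's heap. -/
theorem heapAt_zero (H : Heap) (x : Exts) : heapAt H x 0 = H := rfl

/-- Before the first round: the holder and the whole list (`ExtCells.owns`). -/
theorem liveAt_zero (ob on : Nat) (x : Exts) : liveAt ob on x 0 = (ob, on) :: Exts.objs (some x) := rfl

/-- **One round**: the bytes of block `k` are freed. -/
theorem heapAt_succ (H : Heap) (x : Exts) (k : Nat) (hk : k < x.blocks.length) :
    heapAt H x (k + 1) = (heapAt H x k).releaseAll ((Blk.objs x.blocks[k]).map Prod.fst) := by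
  unfold heapAt
  rw [List.take_succ_eq_append_getElem hk, List.flatMap_append, List.map_append, releaseAll_append]
  simp only [List.flatMap_cons, List.flatMap_nil, List.append_nil]

/-- **One round**: the bytes of block `k` are the first of what is live behind the array. -/
theorem liveAt_succ (ob on : Nat) (x : Exts) (k : Nat) (hk : k < x.blocks.length) :
    liveAt ob on x k = (ob, on) :: (x.arr, 24 * x.cap) :: (Blk.objs x.blocks[k] ++ (x.blocks.drop (k + 1)).flatMap Blk.objs) := by
  unfold liveAt
  rw [List.drop_eq_getElem_cons hk, List.flatMap_cons]

/-- After the last round only the holder and the array are live. -/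
theorem liveAt_end (ob on : Nat) (x : Exts) : liveAt ob on x x.blocks.length = [(ob, on), (x.arr, 24 * x.cap)] := by
  unfold liveAt
  rw [List.drop_length, List.flatMap_nil]

/-- **After the last round and the `free` of the array: the contract's final heap** (the array first there, last here). -/
theorem heapAt_end (H : Heap) (x : Exts) :
    (heapAt H x x.blocks.length).release x.arr = H.releaseAll ((Exts.objs (some x)).map Prod.fst) := by
  unfold heapAt
  rw [List.take_length, releaseAll_release]
  rfl

/-! ### The assertion at the loop head -/

/-- **A window the function writes besides the two cells**: it meets no object of the entry's heap (a chunk header's state word,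
a shadow byte, the stack), and it lies at or above the heap's base or is a stack window below the entry stack pointer — so it
misses every stack object of a caller (the cursor). -/
def GapWin (H : Heap) (e : State) (w : Span) : Prop :=
  Gap0 H w ∧ (0x800000 ≤ w.lo ∨ (0x700000 ≤ w.lo ∧ w.hi ≤ (e.reg .rsp).toNat))

/-- **AT THE LOOP HEAD** (107DD9H, l.276) after `k` rounds, inside the call entered at `e` (return address `ret`) with the
function's precondition, for the list `x` (`ex = some x`). Four registers are saved, `rsp = RA − 40`; `r12 = &count`,
`rbp = &blocks`, `rbx = ep = x.arr + 24 · k`; `r13` is dead (re-loaded). The heap is `heapAt H x k`; the holder, the array and the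
bytes of the blocks from `k` on are live in it; NOTHING of the array or of the two cells was written (`free` writes a header's
state word and shadow bytes only): the cells still hold the list (`shape`), and the memory differs from the entry's in gap
windows only (`gaps`: what the contract's post says of its footprint, before the two stores of the exit). -/
structure Head (H : Heap) (rest : List Obj) (frames : List (Nat × FrameLayout)) (ex : Option Exts) (ob on : Nat) (x : Exts)
    (k : Nat) (u₀ e : State) (ret : Word) (v : State) : Prop where
  /-- the function was entered at `e` … -/
  entry : AtEntry (conv u₀) Gif.L.GifFreeExtensions.entry (GifFreeExtensions.spec H rest frames ex ob on).frame ret e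
  /-- … with its precondition -/
  pre : (GifFreeExtensions.spec H rest frames ex ob on).pre e
  /-- the list is not empty -/
  list : ex = Option.some x
  /-- the rounds done -/
  le : k ≤ x.blocks.length
  rip : v.rip = Gif.L.GifFreeExtensions.at_107dd9
  /-- four pushes and `sub rsp, 8` -/
  rsp : v.reg .rsp = e.reg .rsp - 40
  /-- `mov r12, rdi`: `&count` -/
  r12 : v.reg .r12 = e.reg .rdi
  /-- `mov rbp, rsi`: `&blocks` -/
  rbp : v.reg .rbp = e.reg .rsi
  /-- `rbx = ep`: the block of the next round -/
  rbx : (v.reg .rbx).toNat = x.arr + 24 * k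
  /-- `r14`, `r15` are not used by the function -/
  r14 : v.reg .r14 = e.reg .r14
  r15 : v.reg .r15 = e.reg .r15
  /-- the saved registers, in push order -/
  slot_r13 : v.mem.readLE (e.reg .rsp - 8) 8 = (e.reg .r13).toNat
  slot_r12 : v.mem.readLE (e.reg .rsp - 16) 8 = (e.reg .r12).toNat
  slot_rbp : v.mem.readLE (e.reg .rsp - 24) 8 = (e.reg .rbp).toNat
  slot_rbx : v.mem.readLE (e.reg .rsp - 32) 8 = (e.reg .rbx).toNat
  /-- the return address is still in its slot (`ret` at 107E31H pops it): every store so far went below `RA` (the pushes, the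
  callees' frames) or into the heap's region and the shadow (`free`) -/
  slot_ra : UInt64.ofNat (v.mem.readLE (e.reg .rsp) 8) = ret
  /-- the heap's invariant for the heap after `k` rounds, the clean stack ending at the present stack pointer -/
  inv : HeapInv (heapAt H x k) rest frames ((e.reg .rsp).toNat - 40) v.mem
  /-- what is still live -/
  owns : Owns (heapAt H x k) (liveAt ob on x k)
  /-- the two cells still hold the list, whose counted blocks' fields are as at the entry -/
  shape : ExtsAt (some x) (rd v.mem (e.reg .rsi).toNat 8) (rd v.mem (e.reg .rdi).toNat 4) v.mem
  /-- the footprint so far, as the contract's post states it: gap windows only -/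
  gaps : ∃ ws, Mem.SameExcept ws e.mem v.mem ∧ ∀ w, w ∈ ws → GapWin H e w
  /-- nothing was written but the function's stack and the contract's windows -/
  same : Mem.SameExcept
    [⟨(e.reg .rsp).toNat - 80, (e.reg .rsp).toNat⟩,
     ⟨0x800000, 0x1000020⟩] e.mem v.mem
  code : (conv u₀).code.In v.mem
  abi : (conv u₀).inv v

/-- **Segment 1** (107DA0H … 107DC3H, 107E27H … ret; 19 instructions; l.268-276): the prologue, the checked load of `*blocks`. The
empty list (`ex = none`: the cell holds NULL): the epilogue, `Returned` (the final heap is `H.releaseAll [] = H`; the cells hold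
`(0, 0)` by `ExtCells.shape`). Otherwise (`ex = some x`: the cell holds `x.arr`, the base of a live object: not NULL) to the
loop head with `k = 0` (`heapAt_zero`, `liveAt_zero`). -/
def Seg1 (Lay : Layout) (μ : Microarch) (u₀ : State) : Prop :=
  ∀ (H : Heap) (rest : List Obj) (frames : List (Nat × FrameLayout)) (ex : Option Exts) (ob on : Nat) (e : State) (ret : Word),
    AtEntry (conv u₀) Gif.L.GifFreeExtensions.entry (GifFreeExtensions.spec H rest frames ex ob on).frame ret e →
    (GifFreeExtensions.spec H rest frames ex ob on).pre e →
    ReachVia Lay μ WayInv e (fun w =>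
      (∃ x, Head H rest frames ex ob on x 0 u₀ e ret w) ∨
      Returned (conv u₀) (GifFreeExtensions.spec H rest frames ex ob on) e ret w)

/-- **Segment 2** (107DC3H … ret, entered at the head 107DD9H; 29 instructions; l.276-282): from the loop head. The checked loads
of `*blocks`, `*count`; `ep` below the end (`k < length`): the checked load of `ep->Bytes`, `free` of it (`free.spec` with
`n = len`; NULL for a block whose allocation failed: `Blk.objs = []`), `ep++`: the head again, one round later (`heapAt_succ`,
`liveAt_succ`). Otherwise (`k = length`): `free(*blocks)` (the array: `liveAt_end`), the two checked stores into the cells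
(inside the live holder), the epilogue: `Returned`, with `heapAt_end` for the final heap and the gap windows plus the two cells
for the footprint. -/
def Seg2 (Lay : Layout) (μ : Microarch) (u₀ : State) : Prop :=
  ∀ (H : Heap) (rest : List Obj) (frames : List (Nat × FrameLayout)) (ex : Option Exts) (ob on : Nat) (x : Exts) (k : Nat)
    (e : State) (ret : Word) (v : State),
    Head H rest frames ex ob on x k u₀ e ret v →
    ReachVia Lay μ WayInv v (fun w =>
      Head H rest frames ex ob on x (k + 1) u₀ e ret w ∨
      Returned (conv u₀) (GifFreeExtensions.spec H rest frames ex ob on) e ret w)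

/-- From the loop head to the return, by induction on the number of blocks left (`d` bounds `length − k`). -/
theorem from_head {Lay : Layout} {μ : Microarch} {u₀ : State} (h2 : Seg2 Lay μ u₀) (H : Heap) (rest : List Obj)
    (frames : List (Nat × FrameLayout)) (ex : Option Exts) (ob on : Nat) (x : Exts) (e : State) (ret : Word) :
    ∀ (d k : Nat), x.blocks.length - k ≤ d → ∀ v, Head H rest frames ex ob on x k u₀ e ret v →
      ReachVia Lay μ WayInv v (Returned (conv u₀) (GifFreeExtensions.spec H rest frames ex ob on) e ret) := by
  intro d
  induction d with
  | zero =>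
    intro k hk v hv
    refine (h2 H rest frames ex ob on x k e ret v hv).trans ?_
    intro w hw
    rcases hw with hw | hw
    · have hle := hw.le
      omega
    · exact ReachVia.done hw
  | succ d ih =>
    intro k hk v hv
    refine (h2 H rest frames ex ob on x k e ret v hv).trans ?_
    intro w hw
    rcases hw with hw | hw
    · exact ih (k + 1) (by omega) w hw
    · exact ReachVia.done hw

/-- **The composition of `GifFreeExtensions`**: the prologue, then the loop by induction on the number of blocks left. -/
theorem compose {Lay : Layout} {μ : Microarch} {u₀ : State} (h1 : Seg1 Lay μ u₀) (h2 : Seg2 Lay μ u₀) :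
    ∀ (H : Heap) (rest : List Obj) (frames : List (Nat × FrameLayout)) (ex : Option Exts) (ob on : Nat),
      Calls Lay μ WayInv (conv u₀) Gif.L.GifFreeExtensions.entry (GifFreeExtensions.spec H rest frames ex ob on) := by
  intro H rest frames ex ob on e ret he hp
  refine (h1 H rest frames ex ob on e ret he hp).trans ?_
  intro v hv
  rcases hv with hv | hv
  · obtain ⟨x, hv⟩ := hv
    exact from_head h2 H rest frames ex ob on x e ret (x.blocks.length - 0) 0 (Nat.le_refl _) v hv
  · exact ReachVia.done hv

end GifFreeExtensions

end Gif.Spec
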